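-- pv_equiv track=rewrite | github.com/buzzdavidson/oneWireNeo | test/onewireneoTests.py | getMemoryBytes
-- ===== SOURCE A (Python) =====
-- def getMemoryBytes(count):
--     cyclestring='1234567890ABCDEF'
--     output = list()
--     i = 0
--     while i < count:
--         output.append(cyclestring[i % len(cyclestring)])
--         i += 1
--     return ''.join(output)
-- ===== SOURCE B (Python) =====
-- def getMemoryBytes(count):
--     cyclestring = '1234567890ABCDEF'
--     n = max(count, 0)
--     return cyclestring * (n // 16) + cyclestring[:n % 16]
-- ===== Notes on version B (the rewrite author's own statement) =====
-- stated objective: faster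
-- what changed: Replaces the per-character while-loop (append one indexed char per step) with a closed form: clamp the count at zero, then repeat the cycle string for the full cycles (integer division) and slice it for the remainder.
import Mathlib
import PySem

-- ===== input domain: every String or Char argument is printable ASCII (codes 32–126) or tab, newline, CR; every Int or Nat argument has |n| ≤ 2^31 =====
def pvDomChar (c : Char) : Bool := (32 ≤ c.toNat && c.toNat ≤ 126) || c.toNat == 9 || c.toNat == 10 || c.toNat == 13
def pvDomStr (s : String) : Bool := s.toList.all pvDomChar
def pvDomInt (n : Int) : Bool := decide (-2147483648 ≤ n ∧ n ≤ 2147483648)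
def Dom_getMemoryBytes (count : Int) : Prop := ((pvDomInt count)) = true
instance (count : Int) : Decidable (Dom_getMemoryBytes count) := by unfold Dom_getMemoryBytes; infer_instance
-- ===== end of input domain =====

-- ===== PORT A =====
-- Header: B replaces A's per-character while-loop with the closed form
-- cyclestring * (n // 16) + cyclestring[:n % 16] after clamping n = max(count, 0);
-- measurably faster (constant-factor: C-level repetition/slice instead of a Python loop).

-- the literal '1234567890ABCDEF' as A's code holds it
def pvCycleA : List Char := "1234567890ABCDEF".toList

-- the while-loop of A, step for step: i counts up, one indexed char appended per step.
-- cyclestring[i % len(cyclestring)] never raises (0 ≤ i % 16 < 16), so .getD ' ' is exact.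
def getMemoryBytesLoop (count : Int) (i : Int) (output : List Char) : List Char :=
  if _h : i < count then
    getMemoryBytesLoop count (i + 1)
      (output ++ [(PySem.List.pyGet? pvCycleA (PySem.Int.mod i (pvCycleA.length : Int))).getD ' '])
  else output
termination_by (count - i).toNat
decreasing_by omega

def getMemoryBytes (count : Int) : String :=
  String.ofList (getMemoryBytesLoop count 0 [])

-- ===== PORT B =====
def pvCycleB : List Char := "1234567890ABCDEF".toList

-- B: n = max(count, 0); cyclestring * (n // 16) + cyclestring[:n % 16]
def getMemoryBytes_alt (count : Int) : String :=
  let n : Int := max count 0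
  String.ofList (PySem.List.pyRepeat pvCycleB (PySem.Int.floordiv n 16) ++
             PySem.List.slice pvCycleB none (some (PySem.Int.mod n 16)))


-- ===== PRECONDITION & SPEC =====
def Spec_getMemoryBytes (count : Int) (out : String) : Prop := out = getMemoryBytes_alt count
instance (count : Int) (out : String) : Decidable (Spec_getMemoryBytes count out) := by unfold Spec_getMemoryBytes; infer_instance

-- ===== CLAIM (what is proved, stated in full; the proofs are below) =====
def Claim_equal_getMemoryBytes : Prop := ∀ (count : Int), Dom_getMemoryBytes count → Spec_getMemoryBytes count (getMemoryBytes count)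

-- ===== LEMMAS AND PROOFS =====

-- the character A's loop appends at step k (k = the loop counter, a Nat)
def pvG (k : Nat) : Char := pvCycleA.getD (k % 16) ' '

theorem pvCycleA_length : pvCycleA.length = 16 := by decide

-- one loop step's character equals pvG
theorem step_eq_pvG (j : Nat) :
    (PySem.List.pyGet? pvCycleA (PySem.Int.mod (j:Int) (pvCycleA.length : Int))).getD ' ' = pvG j := by
  rw [pvCycleA_length, PySem.Int.mod_natCast, PySem.List.pyGet?_natCast, pvG,
      List.getD_eq_getElem?_getD]

-- A's loop, from counter j with accumulator out, appends the mapped range [j, j+m)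
theorem loop_eq_map (m : Nat) : ∀ (j : Nat) (count : Int) (out : List Char),
    (count - (j:Int)).toNat = m →
    getMemoryBytesLoop count (j:Int) out = out ++ (List.range' j m).map pvG := by
  induction m with
  | zero =>
    intro j count out h
    rw [getMemoryBytesLoop]
    have : ¬ ((j:Int) < count) := by omega
    simp [this]
  | succ m ih =>
    intro j count out h
    rw [getMemoryBytesLoop]
    have hlt : (j:Int) < count := by omega
    have hcast : (j:Int) + 1 = ((j+1 : Nat) : Int) := by push_cast; ring
    simp only [hlt, dif_pos, hcast]
    rw [ih (j+1) count _ (by omega)]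
    rw [List.range'_succ, List.map_cons, step_eq_pvG]
    simp

-- closed form of the mapped range: full 16-cycles then the remainder prefix
theorem range_map_closed (m : Nat) :
    (List.range' 0 m).map pvG =
      (List.replicate (m / 16) pvCycleA).flatten ++ pvCycleA.take (m % 16) := by
  induction m with
  | zero => simp
  | succ m ih =>
    rw [List.range'_concat, List.map_append, ih, List.map_singleton]
    have hm : 0 + 1 * m = m := by omega
    rw [hm]
    by_cases h : m % 16 = 15
    · have h1 : (m + 1) / 16 = m / 16 + 1 := by omega
      have h2 : (m + 1) % 16 = 0 := by omega
      rw [h1, h2, List.replicate_succ', List.flatten_append]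
      have : pvCycleA.take (m % 16) ++ [pvG m] = pvCycleA := by
        rw [h]; simp [pvG, h]; decide
      rw [List.append_assoc, this]; simp
    · have h1 : (m + 1) / 16 = m / 16 := by omega
      have h2 : (m + 1) % 16 = m % 16 + 1 := by omega
      have hr : m % 16 < pvCycleA.length := by rw [pvCycleA_length]; omega
      rw [h1, h2, List.take_add_one, List.getElem?_eq_getElem hr]
      have : pvG m = pvCycleA[m % 16] := by
        rw [pvG, List.getD_eq_getElem?_getD, List.getElem?_eq_getElem hr]; rfl
      simp [this]

-- ===== VERDICT (by name: the statement is the Claim_ definition above) =====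
theorem getMemoryBytes_spec : Claim_equal_getMemoryBytes := by
  intro count _
  unfold Spec_getMemoryBytes getMemoryBytes
  show String.ofList (getMemoryBytesLoop count 0 []) =
    String.ofList (PySem.List.pyRepeat pvCycleB (PySem.Int.floordiv (max count 0) 16) ++
               PySem.List.slice pvCycleB none (some (PySem.Int.mod (max count 0) 16)))
  have h0 : ((0:Nat):Int) = (0:Int) := rfl
  rw [← h0, loop_eq_map count.toNat 0 count [] (by omega), List.nil_append,
      range_map_closed]
  have hmax : max count ((0:Nat):Int) = ((count.toNat : Nat) : Int) := by omega
  have h16 : ((16:Nat):Int) = (16:Int) := by norm_num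
  have hAB : pvCycleB = pvCycleA := rfl
  have e1 : PySem.Int.floordiv (max count ((0:Nat):Int)) 16 = ((count.toNat / 16 : Nat) : Int) := by
    rw [hmax, ← h16, PySem.Int.floordiv_natCast]
  have e2 : PySem.Int.mod (max count ((0:Nat):Int)) 16 = ((count.toNat % 16 : Nat) : Int) := by
    rw [hmax, ← h16, PySem.Int.mod_natCast]
  rw [e1, e2, PySem.List.slice_to_natCast, hAB, PySem.List.pyRepeat, Int.toNat_natCast]
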